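-- pv_equiv track=rewrite | github.com/pc5401/my_BOJ | 백준/Silver/13022. 늑대와 올바른 단어/늑대와 올바른 단어.py | solve
-- ===== SOURCE A (Python) =====
-- def solve(s: str) -> int:
--     idx = 0
--     L = len(s)
--     while idx < L:
--         if s[idx] != 'w':
--             return 0
--         # 개수
--         n = 0
--         while idx < L and s[idx] == 'w':
--             n += 1
--             idx += 1
--         # o
--         cnt = 0
--         while idx < L and s[idx] == 'o':
--             cnt += 1
--             idx += 1
--         if cnt != n:
--             return 0
--         # l
--         cnt = 0
--         while idx < L and s[idx] == 'l':
--             cnt += 1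
--             idx += 1
--         if cnt != n:
--             return 0
--         # f
--         cnt = 0
--         while idx < L and s[idx] == 'f':
--             cnt += 1
--             idx += 1
--         if cnt != n:
--             return 0
--     return 1
-- ===== SOURCE B (Python) =====
-- def solve(s: str) -> int:
--     # Run-length encode s in one pass, then validate the runs four at a time.
--     runs = []
--     prev = None
--     cnt = 0
--     for c in s:
--         if c == prev:
--             cnt += 1
--         else:
--             if prev is not None:
--                 runs.append((prev, cnt))
--             prev, cnt = c, 1
--     if prev is not None:
--         runs.append((prev, cnt))
--     if len(runs) % 4 != 0:
--         return 0
--     for i in range(0, len(runs), 4):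
--         (c0, n0), (c1, n1), (c2, n2), (c3, n3) = runs[i:i + 4]
--         if (c0, c1, c2, c3) != ('w', 'o', 'l', 'f') or not (n0 == n1 == n2 == n3):
--             return 0
--     return 1
-- ===== Notes on version B (the rewrite author's own statement) =====
-- stated objective: alternative
-- what changed: B run-length-encodes the string once into (char,count) runs and then validates the run list in chunks of four (labels w,o,l,f in order, equal counts), instead of A's interleaved index-scanning with early returns inside one while loop.
import Mathlib
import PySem

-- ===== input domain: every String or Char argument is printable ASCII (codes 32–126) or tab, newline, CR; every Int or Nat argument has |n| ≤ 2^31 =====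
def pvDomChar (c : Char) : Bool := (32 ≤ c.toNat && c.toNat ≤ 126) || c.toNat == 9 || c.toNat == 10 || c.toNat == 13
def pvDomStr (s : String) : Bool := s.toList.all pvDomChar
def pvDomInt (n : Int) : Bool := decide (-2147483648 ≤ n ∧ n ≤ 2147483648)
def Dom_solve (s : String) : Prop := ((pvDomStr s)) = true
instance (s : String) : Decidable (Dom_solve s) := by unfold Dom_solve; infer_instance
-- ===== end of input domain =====

-- B validates the run-length encoding in chunks of four; A scans the string with nested index loops.

-- ===== PORT A =====
-- A's inner "while idx < L and s[idx] == c: cnt += 1; idx += 1" loops: count the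
-- leading run of c and return the rest of the string.
def runLen (c : Char) : List Char → Nat × List Char
  | [] => (0, [])
  | x :: xs => if x = c then let p := runLen c xs; (p.1 + 1, p.2) else (0, x :: xs)

-- needed for the termination of solveLoop below
theorem runLen_len_le (c : Char) (l : List Char) : (runLen c l).2.length ≤ l.length := by
  induction l with
  | nil => simp [runLen]
  | cons x xs ih =>
    by_cases h : x = c <;> simp [runLen, h]
    exact Nat.le_succ_of_le ih

-- A's outer while loop over idx, recursing on the unread suffix of s.
def solveLoop : List Char → Int
  | [] => 1
  | x :: xs =>
    if h : x ≠ 'w' then 0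
    else
      let p1 := runLen 'w' (x :: xs)
      let p2 := runLen 'o' p1.2
      if p2.1 ≠ p1.1 then 0
      else
        let p3 := runLen 'l' p2.2
        if p3.1 ≠ p1.1 then 0
        else
          let p4 := runLen 'f' p3.2
          if p4.1 ≠ p1.1 then 0
          else solveLoop p4.2
  termination_by l => l.length
  decreasing_by
    simp only [ne_eq, not_not] at h
    calc (runLen 'f' (runLen 'l' (runLen 'o' (runLen 'w' (x :: xs)).2).2).2).2.length
        ≤ (runLen 'l' (runLen 'o' (runLen 'w' (x :: xs)).2).2).2.length := runLen_len_le _ _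
      _ ≤ (runLen 'o' (runLen 'w' (x :: xs)).2).2.length := runLen_len_le _ _
      _ ≤ (runLen 'w' (x :: xs)).2.length := runLen_len_le _ _
      _ ≤ xs.length := by simp [runLen, h]; exact runLen_len_le _ _
      _ < (x :: xs).length := by simp

def solve (s : String) : Int := solveLoop s.toList

-- ===== PORT B =====
-- B's RLE loop state: (prev, cnt, runs)
def rleStep (st : Option Char × Nat × List (Char × Nat)) (c : Char) :
    Option Char × Nat × List (Char × Nat) :=
  if st.1 = some c then (st.1, st.2.1 + 1, st.2.2)
  else
    match st.1 with
    | some p => (some c, 1, st.2.2 ++ [(p, st.2.1)])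
    | none => (some c, 1, st.2.2)

-- the "if prev is not None: runs.append((prev, cnt))" finalisation
def rleFinish (st : Option Char × Nat × List (Char × Nat)) : List (Char × Nat) :=
  match st.1 with
  | some p => st.2.2 ++ [(p, st.2.1)]
  | none => st.2.2

def rleFold (l : List Char) : List (Char × Nat) :=
  rleFinish (l.foldl rleStep (none, 0, []))

-- B's "for i in range(0, len(runs), 4)" loop: consume four runs per iteration.
def checkRuns : List (Char × Nat) → Int
  | [] => 1
  | (c0, n0) :: (c1, n1) :: (c2, n2) :: (c3, n3) :: rest =>
    if (c0, c1, c2, c3) = ('w', 'o', 'l', 'f') ∧ n0 = n1 ∧ n1 = n2 ∧ n2 = n3 then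
      checkRuns rest
    else 0
  | _ => 0

def solve_alt (s : String) : Int :=
  let runs := rleFold s.toList
  if runs.length % 4 ≠ 0 then 0 else checkRuns runs

-- ===== PRECONDITION & SPEC =====
def Spec_solve (s : String) (out : Int) : Prop := out = solve_alt s
instance (s : String) (out : Int) : Decidable (Spec_solve s out) := by unfold Spec_solve; infer_instance

-- ===== CLAIM (what is proved, stated in full; the proofs are below) =====
def Claim_equal_solve : Prop := ∀ (s : String), Dom_solve s → Spec_solve s (solve s)

-- ===== LEMMAS AND PROOFS =====

-- structural RLE used as a bridge between the fold and A's scan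
def rleRec : List Char → List (Char × Nat)
  | [] => []
  | x :: xs => (x, (runLen x xs).1 + 1) :: rleRec (runLen x xs).2
  termination_by l => l.length
  decreasing_by
    exact Nat.lt_succ_of_le (runLen_len_le _ _)

theorem foldl_rleStep_some (r : List Char) :
    ∀ (p : Char) (cnt : Nat) (runs : List (Char × Nat)),
      rleFinish (r.foldl rleStep (some p, cnt, runs)) =
        runs ++ (p, cnt + (runLen p r).1) :: rleRec (runLen p r).2 := by
  induction r with
  | nil => intro p cnt runs; simp [rleFinish, runLen, rleRec]
  | cons c r ih =>
    intro p cnt runs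
    by_cases h : p = c
    · subst h
      simp [List.foldl_cons, rleStep, runLen, ih]
      ring_nf
    · have hne : ¬ (some p = some c) := by simp [h]
      simp only [List.foldl_cons, rleStep, hne, if_false]
      rw [ih c 1 (runs ++ [(p, cnt)])]
      have hcc : runLen p (c :: r) = (0, c :: r) := by
        simp [runLen, Ne.symm h]
      simp [hcc, rleRec, Nat.add_comm]

theorem rleFold_eq_rleRec (l : List Char) : rleFold l = rleRec l := by
  cases l with
  | nil => simp [rleFold, rleFinish, rleRec]
  | cons c r =>
    simp only [rleFold, List.foldl_cons, rleStep, rleRec]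
    rw [if_neg (show ¬((none : Option Char) = some c) by simp)]
    rw [foldl_rleStep_some r c 1 []]
    simp [rleRec, Nat.add_comm]

theorem checkRuns_mod (rs : List (Char × Nat)) (h : rs.length % 4 ≠ 0) :
    checkRuns rs = 0 := by
  match rs with
  | [] => simp at h
  | [(c0, n0)] => simp [checkRuns]
  | [(c0, n0), (c1, n1)] => simp [checkRuns]
  | [(c0, n0), (c1, n1), (c2, n2)] => simp [checkRuns]
  | (c0, n0) :: (c1, n1) :: (c2, n2) :: (c3, n3) :: rest =>
    have h' : rest.length % 4 ≠ 0 := by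
      simp only [List.length_cons] at h
      omega
    simp only [checkRuns]
    split
    · exact checkRuns_mod rest h'
    · rfl

-- checkRuns on a run list headed by a non-'w' run is 0
theorem checkRuns_head_ne (c : Char) (n : Nat) (rs : List (Char × Nat)) (h : c ≠ 'w') :
    checkRuns ((c, n) :: rs) = 0 := by
  match rs with
  | [] => simp [checkRuns]
  | [a] => simp [checkRuns]
  | [a, b] => simp [checkRuns]
  | a :: b :: d :: rest =>
    obtain ⟨c1, n1⟩ := a; obtain ⟨c2, n2⟩ := b; obtain ⟨c3, n3⟩ := d
    simp [checkRuns, h]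

theorem checkRuns_two_ne (c : Char) (n : Nat) (c1 : Char) (n1 : Nat)
    (rs : List (Char × Nat)) (h : c1 ≠ 'o' ∨ n ≠ n1) :
    checkRuns ((c, n) :: (c1, n1) :: rs) = 0 := by
  match rs with
  | [] => simp [checkRuns]
  | [a] => simp [checkRuns]
  | a :: b :: rest =>
    obtain ⟨c2, n2⟩ := a; obtain ⟨c3, n3⟩ := b
    rcases h with h | h <;> simp [checkRuns, h]

theorem checkRuns_three_ne (c : Char) (n : Nat) (c1 : Char) (n1 : Nat) (c2 : Char) (n2 : Nat)
    (rs : List (Char × Nat)) (h : c2 ≠ 'l' ∨ n1 ≠ n2) :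
    checkRuns ((c, n) :: (c1, n1) :: (c2, n2) :: rs) = 0 := by
  match rs with
  | [] => simp [checkRuns]
  | a :: rest =>
    obtain ⟨c3, n3⟩ := a
    rcases h with h | h <;> simp [checkRuns, h]

theorem solveLoop_eq_checkRuns (l : List Char) : solveLoop l = checkRuns (rleRec l) := by
  match l with
  | [] => simp [solveLoop, rleRec, checkRuns]
  | x :: xs =>
    by_cases hw : x = 'w'
    case neg =>
      rw [solveLoop]
      simp only [ne_eq, hw, not_false_eq_true, dite_true]
      rw [rleRec]
      exact (checkRuns_head_ne _ _ _ hw).symm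
    case pos =>
      subst hw
      rw [solveLoop]
      simp only [ne_eq, not_true_eq_false, dite_false]
      rw [rleRec]
      -- p1 = runLen 'w' ('w'::xs) = ((runLen 'w' xs).1 + 1, (runLen 'w' xs).2)
      have hp1 : runLen 'w' ('w' :: xs) = ((runLen 'w' xs).1 + 1, (runLen 'w' xs).2) := by
        simp [runLen]
      set n := (runLen 'w' xs).1 + 1 with hn
      set r1 := (runLen 'w' xs).2 with hr1
      rw [hp1]
      simp only
      match hr1eq : r1 with
      | [] =>
        have : runLen 'o' ([] : List Char) = (0, []) := by simp [runLen]
        simp [this, rleRec, checkRuns, hn]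
      | y :: ys =>
        by_cases ho : y = 'o'
        case neg =>
          have h2 : runLen 'o' (y :: ys) = (0, y :: ys) := by simp [runLen, ho]
          rw [h2]
          simp only [rleRec]
          have : (0 : Nat) ≠ n := by omega
          simp only [ne_eq, this, not_false_eq_true, if_true]
          rw [checkRuns_two_ne _ _ _ _ _ (Or.inl ho)]
        case pos =>
          subst ho
          have h2 : runLen 'o' ('o' :: ys) = ((runLen 'o' ys).1 + 1, (runLen 'o' ys).2) := by
            simp [runLen]
          rw [h2]
          simp only [rleRec]
          set r2 := (runLen 'o' ys).2 with hr2
          by_cases hcnt : (runLen 'o' ys).1 + 1 = n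
          case neg =>
            simp only [ne_eq, hcnt, not_false_eq_true, if_true]
            rw [checkRuns_two_ne _ _ _ _ _ (Or.inr (by omega))]
          case pos =>
            rw [hcnt]
            simp only [ne_eq, not_true_eq_false, if_false]
            -- third run: l
            match hr2eq : r2 with
            | [] =>
              have : runLen 'l' ([] : List Char) = (0, []) := by simp [runLen]
              have hne : (0 : Nat) ≠ n := by omega
              simp [this, rleRec, checkRuns, hne]
            | z :: zs =>
              by_cases hl : z = 'l'
              case neg =>
                have h3 : runLen 'l' (z :: zs) = (0, z :: zs) := by simp [runLen, hl]
                rw [h3]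
                simp only [rleRec]
                have hne : (0 : Nat) ≠ n := by omega
                simp only [ne_eq, hne, not_false_eq_true, if_true]
                rw [checkRuns_three_ne _ _ _ _ _ _ _ (Or.inl hl)]
              case pos =>
                subst hl
                have h3 : runLen 'l' ('l' :: zs) = ((runLen 'l' zs).1 + 1, (runLen 'l' zs).2) := by
                  simp [runLen]
                rw [h3]
                simp only [rleRec]
                set r3 := (runLen 'l' zs).2 with hr3
                by_cases hcnt3 : (runLen 'l' zs).1 + 1 = n
                case neg =>
                  simp only [ne_eq, hcnt3, not_false_eq_true, if_true]
                  rw [checkRuns_three_ne _ _ _ _ _ _ _ (Or.inr (by omega))]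
                case pos =>
                  rw [hcnt3]
                  simp only [ne_eq, not_true_eq_false, if_false]
                  -- fourth run: f
                  match hr3eq : r3 with
                  | [] =>
                    have h4 : runLen 'f' ([] : List Char) = (0, []) := by simp [runLen]
                    have hne : (0 : Nat) ≠ n := by omega
                    simp [h4, rleRec, checkRuns, hne]
                  | w :: ws =>
                    by_cases hf : w = 'f'
                    case neg =>
                      have h4 : runLen 'f' (w :: ws) = (0, w :: ws) := by simp [runLen, hf]
                      rw [h4]
                      simp only [rleRec]
                      have hne : (0 : Nat) ≠ n := by omega
                      simp only [ne_eq, hne, not_false_eq_true, if_true]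
                      simp [checkRuns, hf]
                    case pos =>
                      subst hf
                      have h4 : runLen 'f' ('f' :: ws) =
                          ((runLen 'f' ws).1 + 1, (runLen 'f' ws).2) := by simp [runLen]
                      rw [h4]
                      simp only [rleRec]
                      set r4 := (runLen 'f' ws).2 with hr4
                      by_cases hcnt4 : (runLen 'f' ws).1 + 1 = n
                      case neg =>
                        simp only [ne_eq, hcnt4, not_false_eq_true, if_true]
                        have hne : n ≠ (runLen 'f' ws).1 + 1 := by omega
                        simp [checkRuns, hne]
                      case pos =>
                        rw [hcnt4]
                        simp only [ne_eq, not_true_eq_false, if_false]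
                        rw [solveLoop_eq_checkRuns r4]
                        simp [checkRuns]
  termination_by l.length
  decreasing_by
    have e1 : (runLen 'w' xs).2.length ≤ xs.length := runLen_len_le _ _
    have e2 : (runLen 'o' ys).2.length ≤ ys.length := runLen_len_le _ _
    have e3 : (runLen 'l' zs).2.length ≤ zs.length := runLen_len_le _ _
    have e4 : (runLen 'f' ws).2.length ≤ ws.length := runLen_len_le _ _
    have g1 : ('o' :: ys).length ≤ xs.length := by rw [hr1]; exact e1
    have g2 : ('l' :: zs).length ≤ (runLen 'o' ys).2.length := by rw [hr2]
    have g3 : ('f' :: ws).length ≤ (runLen 'l' zs).2.length := by rw [hr3]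
    simp only [List.length_cons] at g1 g2 g3 ⊢
    omega

theorem solve_alt_eq (s : String) : solve_alt s = checkRuns (rleRec s.toList) := by
  unfold solve_alt
  rw [rleFold_eq_rleRec]
  by_cases h : (rleRec s.toList).length % 4 ≠ 0
  · rw [if_pos h]
    exact (checkRuns_mod _ h).symm
  · simp [h]

-- ===== VERDICT (by name: the statement is the Claim_ definition above) =====
theorem solve_spec : Claim_equal_solve := by
  intro s _
  unfold Spec_solve
  rw [solve_alt_eq, solve, solveLoop_eq_checkRuns]
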